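-- pv_equiv track=rewrite | github.com/rodrigogiraoserrao/projects | automatons/count_passwords.py | generate_state_transitions
-- ===== SOURCE A (Python) =====
-- def generate_next_pwd_states(s):
--     return [s[:i] + (num + 1,) + s[i + 1 :] for i, num in enumerate(s)]
--
-- def generate_state_transitions(classes, max_length):
--     queue = [(0,) * len(classes)]
--     state_transitions = {}
--
--     while queue:
--         state, *queue = queue
--         next_states = generate_next_pwd_states(state) if sum(state) < max_length else []
--         state_transitions[state] = list(zip(classes, next_states))
--         queue.extend(state_ for state_ in next_states if state_ not in queue)
--
--     return state_transitions
-- ===== SOURCE B (Python) =====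
-- def generate_state_transitions(classes, max_length):
--     # Direct enumeration: states are the tuples of non-negative ints (one per class)
--     # whose sum is <= max_length, listed level by level (level = sum), each level in
--     # descending lexicographic order -- no queue, no membership scans.
--     n = len(classes)
--
--     def comps(total, k):
--         # compositions of `total` into k non-negative parts, descending lexicographic
--         if k == 0:
--             return [()] if total == 0 else []
--         return [(v,) + rest for v in range(total, -1, -1) for rest in comps(total - v, k - 1)]
--
--     top = max(max_length, 0) if n else 0
--     table = {}
--     for s in range(top + 1):
--         for state in comps(s, n):
--             if s < max_length:
--                 nxt = [state[:i] + (state[i] + 1,) + state[i + 1:] for i in range(n)]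
--             else:
--                 nxt = []
--             table[state] = list(zip(classes, nxt))
--     return table
-- ===== Notes on version B (the rewrite author's own statement) =====
-- stated objective: alternative
-- what changed: Replaces the BFS worklist (queue pops, linear 'not in queue' membership scans, insertion-ordered dict discovery) by a direct level-by-level enumeration of the states as compositions of each sum 0..max_length in descending lexicographic order, building the table in one pass with no membership tests.
import Mathlib
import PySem

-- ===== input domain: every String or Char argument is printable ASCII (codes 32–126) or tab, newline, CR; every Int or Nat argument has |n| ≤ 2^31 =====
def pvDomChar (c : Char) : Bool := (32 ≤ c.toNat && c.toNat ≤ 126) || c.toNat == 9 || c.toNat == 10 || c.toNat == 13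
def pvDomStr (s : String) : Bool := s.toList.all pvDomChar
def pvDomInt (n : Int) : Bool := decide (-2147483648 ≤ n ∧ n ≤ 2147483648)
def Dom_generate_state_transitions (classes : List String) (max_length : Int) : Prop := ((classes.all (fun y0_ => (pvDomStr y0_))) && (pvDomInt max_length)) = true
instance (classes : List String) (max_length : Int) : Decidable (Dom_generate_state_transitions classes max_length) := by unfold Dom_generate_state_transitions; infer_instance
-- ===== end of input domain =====

-- B drops A's queue-based BFS with its linear membership scans and instead enumerates
-- the states (compositions by level) directly; same return value, no speed claim proved here.

-- ===== PORT A =====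
-- [s[:i] + (num + 1,) + s[i + 1:] for i, num in enumerate(s)]
def generate_next_pwd_states (s : List Int) : List (List Int) :=
  (PySem.List.enumerate s).map (fun p =>
    PySem.List.slice s none (some p.1) ++ [p.2 + 1] ++ PySem.List.slice s (some (p.1 + 1)) none)

-- the while-loop of A; fuel makes the recursion structural, proven sufficient below
def pvLoopA (classes : List String) (max_length : Int) :
    Nat → List (List Int) → PySem.Dict (List Int) (List (String × List Int)) →
    PySem.Dict (List Int) (List (String × List Int))
  | 0, _, st => st
  | _ + 1, [], st => st
  | f + 1, state :: queue, st =>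
      let next_states := if state.sum < max_length then generate_next_pwd_states state else []
      let st' := st.insert state (classes.zip next_states)
      -- queue.extend(s_ for s_ in next_states if s_ not in queue): live membership check
      let queue' := next_states.foldl (fun q c => if c ∈ q then q else q ++ [c]) queue
      pvLoopA classes max_length f queue' st'

def generate_state_transitions (classes : List String) (max_length : Int) :
    List (List Int × List (String × List Int)) :=
  (pvLoopA classes max_length ((max_length.toNat + 1) ^ classes.length)
    [List.replicate classes.length 0] PySem.Dict.empty).items

-- ===== PORT B =====
-- compositions of `total` into k non-negative parts, descending lexicographic
def pvComps (total : Int) : Nat → List (List Int)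
  | 0 => if total = 0 then [([] : List Int)] else []
  | k + 1 => (PySem.List.pyRange total (-1) (-1)).flatMap
      (fun v => (pvComps (total - v) k).map (fun rest => v :: rest))

def generate_state_transitions_alt (classes : List String) (max_length : Int) :
    List (List Int × List (String × List Int)) :=
  let n := classes.length
  let top : Int := if n = 0 then 0 else max max_length 0
  ((PySem.List.pyRange 0 (top + 1)).foldl (fun table s =>
      (pvComps s n).foldl (fun table state =>
        let nxt := if s < max_length then
            (PySem.List.pyRange 0 (n : Int)).map (fun i =>
              PySem.List.slice state none (some i) ++ [PySem.List.pyGetD state i 0 + 1]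
                ++ PySem.List.slice state (some (i + 1)) none)
          else []
        table.insert state (classes.zip nxt)) table)
    PySem.Dict.empty).items

-- ===== PRECONDITION & SPEC =====
def Spec_generate_state_transitions (classes : List String) (max_length : Int) (out : List (List Int × List (String × List Int))) : Prop := out = generate_state_transitions_alt classes max_length
instance (classes : List String) (max_length : Int) (out : List (List Int × List (String × List Int))) : Decidable (Spec_generate_state_transitions classes max_length out) := by unfold Spec_generate_state_transitions; infer_instance

-- ===== CLAIM (what is proved, stated in full; the proofs are below) =====
def Claim_equal_generate_state_transitions : Prop := ∀ (classes : List String) (max_length : Int), Dom_generate_state_transitions classes max_length → Spec_generate_state_transitions classes max_length (generate_state_transitions classes max_length)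

-- ===== LEMMAS AND PROOFS =====

-- `pvBump x i` = x with position i incremented
def pvBump : List Int → Nat → List Int
  | [], _ => []
  | a :: xs, 0 => (a + 1) :: xs
  | a :: xs, i + 1 => a :: pvBump xs i

def pvChild (x : List Int) : List (List Int) := (List.range x.length).map (pvBump x)

theorem pvBump_eq_take_drop (x : List Int) (k : Nat) (h : k < x.length) :
    pvBump x k = x.take k ++ [x[k] + 1] ++ x.drop (k + 1) := by
  induction x generalizing k with
  | nil => simp at h
  | cons a xs ih =>
    cases k with
    | zero => simp [pvBump]
    | succ k => simp at h; simp [pvBump, ih k h]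

theorem sum_pvBump (x : List Int) (k : Nat) (h : k < x.length) :
    (pvBump x k).sum = x.sum + 1 := by
  induction x generalizing k with
  | nil => simp at h
  | cons a xs ih =>
    cases k with
    | zero => simp [pvBump]; ring
    | succ k => simp at h; simp [pvBump, ih k h]; ring

theorem gnextA_eq_pvChild (x : List Int) : generate_next_pwd_states x = pvChild x := by
  apply List.ext_getElem
  · simp [generate_next_pwd_states, pvChild, PySem.List.length_enumerate]
  · intro k h1 h2
    have hk : k < x.length := by
      simpa [generate_next_pwd_states, PySem.List.length_enumerate] using h1
    simp only [generate_next_pwd_states, pvChild]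
    rw [List.getElem_map, List.getElem_map, List.getElem_range,
        PySem.List.getElem_enumerate x 0 k (by simpa [PySem.List.length_enumerate] using hk)]
    simp only [zero_add]
    rw [pvBump_eq_take_drop x k hk]
    rw [show ((k : Int) + 1) = ((k + 1 : Nat) : Int) by push_cast; ring]
    rw [PySem.List.slice_to_natCast x k, PySem.List.slice_from_natCast x (k + 1)]

theorem sum_mem_pvChild {x c : List Int} (h : c ∈ pvChild x) : c.sum = x.sum + 1 := by
  rcases List.mem_map.mp h with ⟨k, hk, rfl⟩
  exact sum_pvBump x k (List.mem_range.mp hk)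

theorem pvChild_cons (v : Int) (t : List Int) :
    pvChild (v :: t) = ((v + 1) :: t) :: (pvChild t).map (fun c => v :: c) := by
  simp [pvChild, List.range_succ_eq_map, List.map_map]
  exact ⟨rfl, fun k _ => rfl⟩

-- comps basics
theorem pvComps_zero (k : Nat) : pvComps 0 k = [List.replicate k 0] := by
  induction k with
  | zero => simp [pvComps]
  | succ k ih =>
    have : PySem.List.pyRange 0 (-1) (-1) = [(0 : Int)] := by
      rw [PySem.List.pyRange_neg_one_cons (by omega), PySem.List.pyRange_neg_one_eq_nil (by omega)]
    simp [pvComps, this, ih, List.replicate_succ]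

theorem mem_pvComps {x : List Int} {t : Int} {k : Nat} (h : x ∈ pvComps t k) :
    x.length = k ∧ x.sum = t ∧ ∀ a ∈ x, 0 ≤ a := by
  induction k generalizing t x with
  | zero =>
    simp [pvComps] at h
    rcases h with ⟨ht, rfl⟩; simp [ht]
  | succ k ih =>
    simp [pvComps] at h
    rcases h with ⟨v, hv, rest, hrest, rfl⟩
    rcases ih hrest with ⟨h1, h2, h3⟩
    refine ⟨by simp [h1], by simp [h2], ?_⟩
    intro a ha; rcases List.mem_cons.mp ha with rfl | ha
    · omega
    · exact h3 a ha

theorem nodup_flatMap_aux {a b : Type} (js : List a) (g : a → List b)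
    (h1 : ∀ j ∈ js, (g j).Nodup) (h2 : js.Nodup)
    (h3 : ∀ i ∈ js, ∀ j ∈ js, ∀ x, x ∈ g i → x ∈ g j → i = j) :
    (js.flatMap g).Nodup := by
  induction js with
  | nil => simp
  | cons j js ih =>
    rw [List.flatMap_cons]
    apply List.Nodup.append
    · exact h1 j (by simp)
    · exact ih (fun i hi => h1 i (by simp [hi])) (List.Nodup.of_cons h2)
        (fun i hi j' hj' x hx hx' => h3 i (by simp [hi]) j' (by simp [hj']) x hx hx')
    · intro x hx hx'
      rcases List.mem_flatMap.mp hx' with ⟨j', hj', hxj'⟩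
      have : j = j' := h3 j (by simp) j' (by simp [hj']) x hx hxj'
      subst this
      exact (List.nodup_cons.mp h2).1 hj'

theorem nodup_pvComps (t : Int) (k : Nat) : (pvComps t k).Nodup := by
  induction k generalizing t with
  | zero => by_cases h : t = 0 <;> simp [pvComps, h]
  | succ k ih =>
    show (List.flatMap _ _).Nodup
    apply nodup_flatMap_aux
    · intro v _
      exact List.Nodup.map (fun a b h => by injection h) (ih (t - v))
    · rw [PySem.List.pyRange_neg_one_eq_reverse]
      exact List.nodup_reverse.mpr (PySem.List.nodup_pyRange_one _ _)
    · intro i _ j _ x hx hx'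
      rcases List.mem_map.mp hx with ⟨r, _, rfl⟩
      rcases List.mem_map.mp hx' with ⟨r', _, he⟩
      exact (List.cons.injEq _ _ _ _ ▸ he).1.symm

-- first-occurrence accumulation (the live-deduplicating queue.extend)
def pvAdd (a : List (List Int)) (c : List Int) : List (List Int) := if c ∈ a then a else a ++ [c]
def pvDD (a : List (List Int)) (cs : List (List Int)) : List (List Int) := cs.foldl pvAdd a
def pvNext (ps : List (List Int)) : List (List Int) := ps.foldl (fun a p => pvDD a (pvChild p)) []

theorem pvDD_lift (v : Int) (cs : List (List Int)) :
    ∀ (Done P : List (List Int)), (∀ d ∈ Done, ∀ u, d ≠ v :: u) →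
    pvDD (Done ++ P.map (fun c => v :: c)) (cs.map (fun c => v :: c))
      = Done ++ (pvDD P cs).map (fun c => v :: c) := by
  induction cs with
  | nil => intro Done P _; rfl
  | cons c cs ih =>
    intro Done P hD
    show pvDD (pvAdd _ _) _ = _
    by_cases hc : c ∈ P
    · have : pvAdd (Done ++ P.map (fun c => v :: c)) (v :: c) = Done ++ P.map (fun c => v :: c) := by
        unfold pvAdd
        rw [if_pos (by simp [hc])]
      rw [this]
      have : pvDD P (c :: cs) = pvDD P cs := by
        show pvDD (pvAdd P c) cs = _
        unfold pvAdd; rw [if_pos hc]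
      rw [this]
      exact ih Done P hD
    · have hnm : (v :: c) ∉ Done ++ P.map (fun c => v :: c) := by
        simp only [List.mem_append, List.mem_map]
        rintro (h | ⟨u, hu, he⟩)
        · exact hD _ h c rfl
        · exact hc ((List.cons.injEq _ _ _ _ ▸ he).2 ▸ hu)
      have : pvAdd (Done ++ P.map (fun c => v :: c)) (v :: c)
          = Done ++ (P ++ [c]).map (fun c => v :: c) := by
        unfold pvAdd; rw [if_neg hnm]; simp
      rw [this]
      have : pvDD P (c :: cs) = pvDD (P ++ [c]) cs := by
        show pvDD (pvAdd P c) cs = _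
        unfold pvAdd; rw [if_neg hc]
      rw [this]
      exact ih Done (P ++ [c]) hD

-- processing one head-block of parents
theorem pvBlock (v : Int) (T : List (List Int)) :
    ∀ (Done P : List (List Int)),
    (∀ t ∈ T, ((v + 1) :: t) ∈ Done) → (∀ d ∈ Done, ∀ u, d ≠ v :: u) →
    T.foldl (fun a t => pvDD a (pvChild (v :: t))) (Done ++ P.map (fun c => v :: c))
      = Done ++ (T.foldl (fun a t => pvDD a (pvChild t)) P).map (fun c => v :: c) := by
  induction T with
  | nil => intro Done P _ _; rfl
  | cons t T ih =>
    intro Done P hT hD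
    rw [List.foldl_cons, List.foldl_cons]
    have h1 : pvDD (Done ++ P.map (fun c => v :: c)) (pvChild (v :: t))
        = Done ++ (pvDD P (pvChild t)).map (fun c => v :: c) := by
      rw [pvChild_cons]
      show pvDD (pvAdd _ _) _ = _
      have : pvAdd (Done ++ P.map (fun c => v :: c)) ((v + 1) :: t)
          = Done ++ P.map (fun c => v :: c) := by
        unfold pvAdd
        rw [if_pos (by simp [hT t (by simp)])]
      rw [this]
      exact pvDD_lift v (pvChild t) Done P hD
    rw [h1]
    exact ih Done (pvDD P (pvChild t)) (fun u hu => hT u (by simp [hu])) hD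

-- pyRange countdown splits
theorem pyRange_neg_one_append (a c b : Int) (h1 : b ≤ c) (h2 : c ≤ a) :
    PySem.List.pyRange a b (-1) = PySem.List.pyRange a c (-1) ++ PySem.List.pyRange c b (-1) := by
  rw [PySem.List.pyRange_neg_one_eq_reverse, PySem.List.pyRange_neg_one_eq_reverse,
      PySem.List.pyRange_neg_one_eq_reverse,
      PySem.List.pyRange_one_append (b + 1) (c + 1) (a + 1) (by omega) (by omega)]
  simp

-- blocks of the next level, heads from s+1 down to b+1
def pvBR (n : Nat) (s : Int) (b : Int) : List (List Int) :=
  (PySem.List.pyRange (s + 1) b (-1)).flatMap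
    (fun w => (pvComps (s + 1 - w) n).map (fun c => w :: c))

theorem pvBR_step (n : Nat) (s v : Int) (hvs : v ≤ s) :
    pvBR n s (v - 1) = pvBR n s v ++ (pvComps (s - v + 1) n).map (fun c => v :: c) := by
  unfold pvBR
  rw [pyRange_neg_one_append (s + 1) v (v - 1) (by omega) (by omega),
      PySem.List.pyRange_neg_one_cons (by omega : v - 1 < v),
      PySem.List.pyRange_neg_one_eq_nil (by omega : v - 1 ≤ v - 1)]
  rw [List.flatMap_append]
  simp only [List.flatMap_cons, List.flatMap_nil, List.append_nil]
  rw [show s + 1 - v = s - v + 1 by ring]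

theorem mem_pvBR {n : Nat} {s b : Int} {d : List Int} (h : d ∈ pvBR n s b) :
    ∃ w c, b < w ∧ w ≤ s + 1 ∧ d = w :: c := by
  rcases List.mem_flatMap.mp h with ⟨w, hw, hd⟩
  rcases List.mem_map.mp hd with ⟨c, _, rfl⟩
  rw [PySem.List.mem_pyRange_neg_one] at hw
  exact ⟨w, c, hw.1, hw.2, rfl⟩

theorem pvRun (n : Nat) (ihn : ∀ u : Int, 0 ≤ u → pvNext (pvComps u n) = pvComps (u + 1) n)
    (s : Int) :
    ∀ (j : Nat) (v : Int), -1 ≤ v → v < s → (v + 1).toNat = j →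
    (PySem.List.pyRange v (-1) (-1)).foldl
        (fun acc v => (pvComps (s - v) n).foldl (fun a t => pvDD a (pvChild (v :: t))) acc)
        (pvBR n s v)
      = pvBR n s (-1) := by
  intro j
  induction j with
  | zero =>
    intro v h1 h2 h3
    have : v = -1 := by omega
    subst this
    rw [PySem.List.pyRange_neg_one_eq_nil (le_refl _)]
    rfl
  | succ j ih =>
    intro v h1 h2 h3
    have hv0 : (0 : Int) ≤ v := by omega
    rw [PySem.List.pyRange_neg_one_cons (by omega : (-1 : Int) < v), List.foldl_cons]
    have hblk : (pvComps (s - v) n).foldl (fun a t => pvDD a (pvChild (v :: t))) (pvBR n s v)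
        = pvBR n s (v - 1) := by
      have hD : ∀ d ∈ pvBR n s v, ∀ u, d ≠ v :: u := by
        intro d hd u he
        rcases mem_pvBR hd with ⟨w, c, hw1, _, rfl⟩
        have : w = v := (List.cons.injEq _ _ _ _ ▸ he).1
        omega
      have hT : ∀ t ∈ pvComps (s - v) n, ((v + 1) :: t) ∈ pvBR n s v := by
        intro t ht
        apply List.mem_flatMap.mpr
        refine ⟨v + 1, PySem.List.mem_pyRange_neg_one.mpr ⟨by omega, by omega⟩, ?_⟩
        apply List.mem_map.mpr
        exact ⟨t, by rw [show s + 1 - (v + 1) = s - v by ring]; exact ht, rfl⟩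
      have hb := pvBlock v (pvComps (s - v) n) (pvBR n s v) [] hT hD
      simp only [List.map_nil, List.append_nil] at hb
      rw [hb]
      have : (pvComps (s - v) n).foldl (fun a t => pvDD a (pvChild t)) [] = pvComps (s - v + 1) n := by
        have := ihn (s - v) (by omega)
        unfold pvNext at this
        exact this
      rw [this, pvBR_step n s v (by omega)]
    rw [hblk]
    exact ih (v - 1) (by omega) (by omega) (by omega)

-- THE combinatorial heart: pushing one level through the deduplicating extension
-- yields exactly the next level of compositions.
theorem pvNext_comps (n : Nat) : ∀ (s : Int), 0 ≤ s → pvNext (pvComps s n) = pvComps (s + 1) n := by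
  induction n with
  | zero =>
    intro s hs
    by_cases h : s = 0
    · subst h
      have h1 : pvComps (0 : Int) 0 = [[]] := by simp [pvComps]
      have h2 : pvComps ((0 : Int) + 1) 0 = [] := by norm_num [pvComps]
      rw [h1, h2]
      rfl
    · have h1 : pvComps s 0 = [] := by simp [pvComps, h]
      have h2 : pvComps (s + 1) 0 = [] := by simp [pvComps]; omega
      rw [h1, h2]
      rfl
  | succ n ihn =>
    intro s hs
    show pvNext ((PySem.List.pyRange s (-1) (-1)).flatMap
        fun v => (pvComps (s - v) n).map (fun rest => v :: rest)) = _
    unfold pvNext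
    rw [List.foldl_flatMap]
    have hcongr : ∀ (acc : List (List Int)), ∀ v ∈ PySem.List.pyRange s (-1) (-1),
        List.foldl (fun a p => pvDD a (pvChild p)) acc ((pvComps (s - v) n).map (fun rest => v :: rest))
          = (pvComps (s - v) n).foldl (fun a t => pvDD a (pvChild (v :: t))) acc := by
      intro acc v _
      rw [List.foldl_map]
    rw [PySem.List.foldl_congr_mem _ _ _ _ hcongr]
    rw [PySem.List.pyRange_neg_one_cons (by omega : (-1 : Int) < s), List.foldl_cons]
    have htop : (pvComps (s - s) n).foldl (fun a t => pvDD a (pvChild (s :: t))) []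
        = pvBR n s (s - 1) := by
      rw [show s - s = (0 : Int) by ring, pvComps_zero, List.foldl_cons, List.foldl_nil,
          pvChild_cons]
      show pvDD (pvAdd [] _) _ = _
      have ha : pvAdd [] ((s + 1) :: List.replicate n 0) = [(s + 1) :: List.replicate n 0] := by
        unfold pvAdd
        rw [if_neg (List.not_mem_nil)]
        rfl
      rw [ha]
      have hD : ∀ d ∈ [(s + 1) :: List.replicate n (0 : Int)], ∀ u, d ≠ s :: u := by
        intro d hd u he
        simp only [List.mem_singleton] at hd
        subst hd
        have : s + 1 = s := (List.cons.injEq _ _ _ _ ▸ he).1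
        omega
      have := pvDD_lift s (pvChild (List.replicate n 0)) [(s + 1) :: List.replicate n 0] [] hD
      simp only [List.map_nil, List.append_nil] at this
      rw [this]
      have hnx : pvDD [] (pvChild (List.replicate n 0)) = pvComps 1 n := by
        have h0 := ihn 0 (le_refl _)
        rw [pvComps_zero] at h0
        unfold pvNext at h0
        rw [List.foldl_cons, List.foldl_nil] at h0
        norm_num at h0
        exact h0
      rw [hnx]
      unfold pvBR
      rw [PySem.List.pyRange_neg_one_cons (by omega : s - 1 < s + 1),
          PySem.List.pyRange_neg_one_cons (by omega : s - 1 < s + 1 - 1),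
          PySem.List.pyRange_neg_one_eq_nil (by omega : s + 1 - 1 - 1 ≤ s - 1)]
      simp only [List.flatMap_cons, List.flatMap_nil, List.append_nil]
      rw [show s + 1 - (s + 1) = (0 : Int) by ring, show s + 1 - 1 = s by ring,
          show s + 1 - s = (1 : Int) by ring, pvComps_zero]
      simp
    rw [htop]
    have hrun := pvRun n ihn s s.toNat (s - 1) (by omega) (by omega) (by omega)
    rw [hrun]
    rfl

-- A's loop processes a whole level
theorem pvLoopA_nil (classes : List String) (m : Int) (f : Nat) (st) :
    pvLoopA classes m f [] st = st := by
  cases f <;> rfl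

def pvGnextIf (m : Int) (x : List Int) : List (List Int) :=
  if x.sum < m then generate_next_pwd_states x else []

theorem pvExtend_disjoint (ns : List (List Int)) :
    ∀ (rest acc : List (List Int)), (∀ c ∈ ns, c ∉ rest) →
    ns.foldl (fun q c => if c ∈ q then q else q ++ [c]) (rest ++ acc)
      = rest ++ pvDD acc ns := by
  induction ns with
  | nil => intro rest acc _; rfl
  | cons c ns ih =>
    intro rest acc hd
    rw [List.foldl_cons]
    have hstep : pvDD acc (c :: ns) = pvDD (pvAdd acc c) ns := rfl
    rw [hstep]
    by_cases hc : c ∈ acc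
    · rw [if_pos (by simp [hc])]
      have : pvAdd acc c = acc := by unfold pvAdd; rw [if_pos hc]
      rw [this]
      exact ih rest acc (fun x hx => hd x (by simp [hx]))
    · rw [if_neg (by simp only [List.mem_append]; rintro (h | h); exacts [hd c (by simp) h, hc h])]
      have : pvAdd acc c = acc ++ [c] := by unfold pvAdd; rw [if_neg hc]
      rw [this, List.append_assoc]
      exact ih rest (acc ++ [c]) (fun x hx => hd x (by simp [hx]))

theorem pvLoopA_level (classes : List String) (m : Int) (s : Int) (rest : List (List Int)) :
    ∀ (f : Nat) (acc : List (List Int)) (st),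
    (∀ x ∈ rest, x.sum = s) →
    pvLoopA classes m (rest.length + f) (rest ++ acc) st
      = pvLoopA classes m f (rest.foldl (fun a x => pvDD a (pvGnextIf m x)) acc)
          (rest.foldl (fun d x => d.insert x (classes.zip (pvGnextIf m x))) st) := by
  induction rest with
  | nil => intro f acc st _; simp
  | cons x rest ih =>
    intro f acc st hs
    have hfuel : (x :: rest).length + f = (rest.length + f) + 1 := by simp; omega
    rw [hfuel]
    show pvLoopA classes m (rest.length + f)
        ((pvGnextIf m x).foldl (fun q c => if c ∈ q then q else q ++ [c]) (rest ++ acc))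
        (st.insert x (classes.zip (pvGnextIf m x))) = _
    rw [pvExtend_disjoint (pvGnextIf m x) rest acc ?_]
    · rw [List.foldl_cons, List.foldl_cons]
      exact ih f (pvDD acc (pvGnextIf m x)) _ (fun y hy => hs y (by simp [hy]))
    · intro c hc hcr
      have hsum : c.sum = x.sum + 1 := by
        unfold pvGnextIf at hc
        by_cases hx : x.sum < m
        · rw [if_pos hx, gnextA_eq_pvChild] at hc
          exact sum_mem_pvChild hc
        · rw [if_neg hx] at hc; simp at hc
      have h1 : x.sum = s := hs x (by simp)
      have h2 : c.sum = s := hs c (by simp [hcr])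
      omega

-- the canonical per-level tail of the table
def pvTop (n : Nat) (m : Int) : Int := if n = 0 then 0 else max m 0

def pvTail (classes : List String) (m : Int) (s : Int) : List (List Int × List (String × List Int)) :=
  (PySem.List.pyRange s (pvTop classes.length m + 1)).flatMap
    (fun j => (pvComps j classes.length).map (fun x => (x, classes.zip (pvGnextIf m x))))

def pvLevels (n : Nat) (m : Int) (s : Int) : List (List Int) :=
  (PySem.List.pyRange s (pvTop n m + 1)).flatMap (fun j => pvComps j n)

theorem nodup_pvLevels (n : Nat) (m : Int) (s : Int) : (pvLevels n m s).Nodup := by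
  unfold pvLevels
  apply nodup_flatMap_aux
  · intro j _
    exact nodup_pvComps j n
  · exact PySem.List.nodup_pyRange_one _ _
  · intro i _ j _ x hx hx'
    rw [← (mem_pvComps hx).2.1, ← (mem_pvComps hx').2.1]

theorem pvContains_false {d : PySem.Dict (List Int) (List (String × List Int))} {x : List Int}
    (h : x ∉ d.keys) : d.contains x = false := by
  cases hc : d.contains x
  · rfl
  · exact absurd ((PySem.Dict.contains_iff_mem_keys d x).mp hc) h

theorem pvLevels_split (n : Nat) (m : Int) (s : Int) (h1 : s ≤ pvTop n m) :
    pvLevels n m s = pvComps s n ++ pvLevels n m (s + 1) := by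
  unfold pvLevels
  rw [PySem.List.pyRange_one_cons (by omega : s < pvTop n m + 1), List.flatMap_cons]

theorem pvTail_split (classes : List String) (m : Int) (s : Int)
    (h1 : s ≤ pvTop classes.length m) :
    pvTail classes m s
      = (pvComps s classes.length).map (fun x => (x, classes.zip (pvGnextIf m x)))
        ++ pvTail classes m (s + 1) := by
  unfold pvTail
  rw [PySem.List.pyRange_one_cons (by omega : s < pvTop classes.length m + 1), List.flatMap_cons]

theorem pvSumTop {n : Nat} {m x_sum : Int} (hn : n ≠ 0) (hs : x_sum = pvTop n m) :
    ¬ x_sum < m := by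
  unfold pvTop at hs
  rw [if_neg hn] at hs
  have := le_max_left m (0 : Int)
  have := le_max_right m (0 : Int)
  omega

theorem pvOuter (classes : List String) (m : Int) :
    ∀ (t : Nat) (s : Int) (st) (f : Nat), 0 ≤ s → s + t = pvTop classes.length m →
    st.keys.Nodup →
    (∀ x ∈ pvLevels classes.length m s, x ∉ st.keys) →
    (pvLevels classes.length m s).length ≤ f →
    (pvLoopA classes m f (pvComps s classes.length) st).items
      = st.items ++ pvTail classes m s := by
  intro t
  induction t with
  | zero =>
    intro s st f hs htop hnd hfresh hf
    rw [Nat.cast_zero, add_zero] at htop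
    have hsplit := pvLevels_split classes.length m s (by omega)
    have hlen : (pvComps s classes.length).length ≤ f := by
      rw [hsplit] at hf
      simp at hf
      omega
    have hfeq : f = (pvComps s classes.length).length + (f - (pvComps s classes.length).length) := by
      omega
    have hlvl := pvLoopA_level classes m s (pvComps s classes.length)
      (f - (pvComps s classes.length).length) [] st (fun x hx => (mem_pvComps hx).2.1)
    rw [List.append_nil] at hlvl
    rw [hfeq, hlvl]
    have hgz : ∀ x ∈ pvComps s classes.length, pvGnextIf m x = [] := by
      intro x hx
      rcases mem_pvComps hx with ⟨hxlen, hxsum, _⟩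
      unfold pvGnextIf
      by_cases hn : classes.length = 0
      · have hx0 : x = [] := List.eq_nil_of_length_eq_zero (hn ▸ hxlen)
        subst hx0
        simp [generate_next_pwd_states, PySem.List.enumerate]
      · rw [if_neg (pvSumTop hn (htop ▸ hxsum))]
    have hq : (pvComps s classes.length).foldl (fun a x => pvDD a (pvGnextIf m x)) [] = [] := by
      rw [PySem.List.foldl_congr_mem _ _ (fun a _ => a) _
        (fun acc x hx => by rw [hgz x hx]; rfl)]
      exact PySem.List.foldl_ignore _ _
    rw [hq, pvLoopA_nil]
    rw [PySem.Dict.items_foldl_insert_fresh (pvComps s classes.length) (fun a => a)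
      (fun x => classes.zip (pvGnextIf m x)) st
      (fun x hx => pvContains_false (hfresh x (hsplit ▸ List.mem_append_left _ hx)))
      (by simpa using nodup_pvComps s classes.length)]
    congr 1
    unfold pvTail
    rw [htop]
    rw [PySem.List.pyRange_one_cons (by omega), PySem.List.pyRange_one_eq_nil (by omega)]
    simp
  | succ t ih =>
    intro s st f hs htop hnd hfresh hf
    have hst : s + 1 ≤ pvTop classes.length m := by
      omega
    have htpos : 1 ≤ pvTop classes.length m := by omega
    have hn : classes.length ≠ 0 := by
      intro h
      unfold pvTop at htpos
      rw [if_pos h] at htpos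
      omega
    have hm : m = pvTop classes.length m := by
      unfold pvTop
      rw [if_neg hn]
      unfold pvTop at htpos
      rw [if_neg hn] at htpos
      rcases le_total m 0 with h | h
      · rw [max_eq_right h] at htpos ⊢; omega
      · rw [max_eq_left h]
    have hsplit := pvLevels_split classes.length m s (by omega)
    have hlen : (pvComps s classes.length).length ≤ f ∧
        (pvLevels classes.length m (s + 1)).length ≤ f - (pvComps s classes.length).length := by
      rw [hsplit] at hf
      simp at hf
      omega
    have hfeq : f = (pvComps s classes.length).length + (f - (pvComps s classes.length).length) := by
      omega
    have hlvl := pvLoopA_level classes m s (pvComps s classes.length)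
      (f - (pvComps s classes.length).length) [] st (fun x hx => (mem_pvComps hx).2.1)
    rw [List.append_nil] at hlvl
    rw [hfeq, hlvl]
    have hq : (pvComps s classes.length).foldl (fun a x => pvDD a (pvGnextIf m x)) []
        = pvComps (s + 1) classes.length := by
      rw [PySem.List.foldl_congr_mem _ _ (fun a x => pvDD a (pvChild x)) _ ?_]
      · have := pvNext_comps classes.length s hs
        unfold pvNext at this
        exact this
      · intro acc x hx
        rcases mem_pvComps hx with ⟨_, hxsum, _⟩
        unfold pvGnextIf
        rw [if_pos (by omega : x.sum < m), gnextA_eq_pvChild]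
    rw [hq]
    have hkeys : (List.foldl (fun d x => d.insert x (classes.zip (pvGnextIf m x))) st
        (pvComps s classes.length)).keys = st.keys ++ pvComps s classes.length := by
      rw [PySem.Dict.keys_foldl_insert (pvComps s classes.length)
        (fun _ x => classes.zip (pvGnextIf m x)) st]
      exact PySem.Set.update_eq_append_of_disjoint st.keys (pvComps s classes.length)
        (nodup_pvComps s classes.length)
        (fun x hx => hfresh x (hsplit ▸ List.mem_append_left _ hx))
    rw [ih (s + 1) _ _ (by omega) (by omega) ?nd ?fr hlen.2]
    case nd =>
      exact PySem.Dict.nodup_keys_foldl_insert _ _ st hnd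
    case fr =>
      intro x hx
      rw [hkeys, List.mem_append]
      rintro (h | h)
      · exact hfresh x (hsplit ▸ List.mem_append_right _ hx) h
      · rcases List.mem_flatMap.mp hx with ⟨j, hj, hxj⟩
        rw [PySem.List.mem_pyRange_one] at hj
        have h1 := (mem_pvComps hxj).2.1
        have h2 := (mem_pvComps h).2.1
        omega
    rw [PySem.Dict.items_foldl_insert_fresh (pvComps s classes.length) (fun a => a)
      (fun x => classes.zip (pvGnextIf m x)) st
      (fun x hx => pvContains_false (hfresh x (hsplit ▸ List.mem_append_left _ hx)))
      (by simpa using nodup_pvComps s classes.length)]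
    rw [pvTail_split classes m s (by omega), List.append_assoc]

-- fuel bound: all states are length-n tuples with entries in [0, top]
def pvAllT (b : Int) : Nat → List (List Int)
  | 0 => [[]]
  | k + 1 => (PySem.List.pyRange 0 (b + 1)).flatMap (fun v => (pvAllT b k).map (fun c => v :: c))

theorem length_pvAllT (b : Int) (hb : 0 ≤ b) (k : Nat) :
    (pvAllT b k).length = (b.toNat + 1) ^ k := by
  induction k with
  | zero => simp [pvAllT]
  | succ k ih =>
    show (List.flatMap _ _).length = _
    rw [List.length_flatMap]
    have h1 : (List.map (fun a => ((pvAllT b k).map (fun c => a :: c)).length)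
        (PySem.List.pyRange 0 (b + 1)))
        = (PySem.List.pyRange 0 (b + 1)).map (fun _ => (b.toNat + 1) ^ k) := by
      apply List.map_congr_left
      intro v _
      simp [ih]
    rw [h1, List.map_const', List.sum_replicate, smul_eq_mul,
        PySem.List.length_pyRange_one, pow_succ]
    have h2 : (b + 1 - 0).toNat = b.toNat + 1 := by omega
    rw [h2]
    ring

theorem mem_pvAllT (b : Int) (k : Nat) :
    ∀ (x : List Int), x.length = k → (∀ a ∈ x, 0 ≤ a ∧ a ≤ b) → x ∈ pvAllT b k := by
  induction k with
  | zero =>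
    intro x hl _
    rw [List.eq_nil_of_length_eq_zero hl]
    simp [pvAllT]
  | succ k ih =>
    intro x hl hb
    rcases x with _ | ⟨a, xs⟩
    · simp at hl
    · show _ ∈ List.flatMap _ _
      apply List.mem_flatMap.mpr
      refine ⟨a, PySem.List.mem_pyRange_one.mpr ⟨(hb a (by simp)).1, by
        have := (hb a (by simp)).2; omega⟩, ?_⟩
      apply List.mem_map.mpr
      exact ⟨xs, ih xs (by simpa using hl) (fun y hy => hb y (by simp [hy])), rfl⟩

theorem pvTop_nonneg (n : Nat) (m : Int) : 0 ≤ pvTop n m := by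
  unfold pvTop
  split_ifs
  · omega
  · exact le_max_right m 0

theorem pvFuel (n : Nat) (m : Int) :
    (pvLevels n m 0).length ≤ (m.toNat + 1) ^ n := by
  have htop := pvTop_nonneg n m
  have hsub : ∀ x ∈ pvLevels n m 0, x ∈ pvAllT (pvTop n m) n := by
    intro x hx
    rcases List.mem_flatMap.mp hx with ⟨j, hj, hxj⟩
    rw [PySem.List.mem_pyRange_one] at hj
    rcases mem_pvComps hxj with ⟨h1, h2, h3⟩
    apply mem_pvAllT
    · exact h1
    · intro a ha
      refine ⟨h3 a ha, ?_⟩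
      have : a ≤ x.sum := List.single_le_sum h3 a ha
      omega
  have hle := (List.subperm_of_subset (nodup_pvLevels n m 0) hsub).length_le
  rw [length_pvAllT _ htop] at hle
  refine hle.trans (Nat.pow_le_pow_left ?_ n)
  have : (pvTop n m).toNat ≤ m.toNat := by
    unfold pvTop
    split_ifs
    · omega
    · rcases le_total m 0 with h | h
      · rw [max_eq_right h]; omega
      · rw [max_eq_left h]
  omega

theorem pvB_term_eq (classes : List String) (x : List Int) (hlen : x.length = classes.length) :
    (PySem.List.pyRange 0 (classes.length : Int)).map (fun i =>
        PySem.List.slice x none (some i) ++ [PySem.List.pyGetD x i 0 + 1]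
          ++ PySem.List.slice x (some (i + 1)) none)
      = pvChild x := by
  rw [PySem.List.pyRange_zero_natCast, List.map_map]
  unfold pvChild
  rw [← hlen]
  apply List.map_congr_left
  intro k hk
  rw [List.mem_range] at hk
  simp only [Function.comp_apply]
  rw [PySem.List.pyGetD_eq_getElem x 0 (by omega) (by exact_mod_cast Int.ofNat_lt.mpr hk)]
  rw [pvBump_eq_take_drop x k hk]
  rw [show ((k : Int) + 1) = ((k + 1 : Nat) : Int) by push_cast; ring]
  rw [PySem.List.slice_to_natCast x k, PySem.List.slice_from_natCast x (k + 1)]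
  simp

-- B reduces to the canonical table
theorem pvAltEq (classes : List String) (m : Int) :
    generate_state_transitions_alt classes m = pvTail classes m 0 := by
  show (List.foldl (fun table s =>
      (pvComps s classes.length).foldl (fun table state =>
        table.insert state (classes.zip (if s < m then
            (PySem.List.pyRange 0 (classes.length : Int)).map (fun i =>
              PySem.List.slice state none (some i) ++ [PySem.List.pyGetD state i 0 + 1]
                ++ PySem.List.slice state (some (i + 1)) none)
          else []))) table)
    PySem.Dict.empty (PySem.List.pyRange 0 (pvTop classes.length m + 1))).items = _
  have hval : ∀ (s : Int) (x : List Int), x ∈ pvComps s classes.length →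
      classes.zip (if s < m then
          (PySem.List.pyRange 0 (classes.length : Int)).map (fun i =>
            PySem.List.slice x none (some i) ++ [PySem.List.pyGetD x i 0 + 1]
              ++ PySem.List.slice x (some (i + 1)) none)
        else [])
      = classes.zip (pvGnextIf m x) := by
    intro s x hx
    rcases mem_pvComps hx with ⟨hlen, hsum, _⟩
    unfold pvGnextIf
    rw [← hsum]
    by_cases h : x.sum < m
    · rw [if_pos h, if_pos h, pvB_term_eq classes x hlen, gnextA_eq_pvChild]
    · rw [if_neg h, if_neg h]
  have hcongr : List.foldl (fun table s =>
      (pvComps s classes.length).foldl (fun table state =>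
        table.insert state (classes.zip (if s < m then
            (PySem.List.pyRange 0 (classes.length : Int)).map (fun i =>
              PySem.List.slice state none (some i) ++ [PySem.List.pyGetD state i 0 + 1]
                ++ PySem.List.slice state (some (i + 1)) none)
          else []))) table)
      PySem.Dict.empty (PySem.List.pyRange 0 (pvTop classes.length m + 1))
      = List.foldl (fun table s =>
          (pvComps s classes.length).foldl (fun table state =>
            table.insert state (classes.zip (pvGnextIf m state))) table)
        PySem.Dict.empty (PySem.List.pyRange 0 (pvTop classes.length m + 1)) := by
    apply PySem.List.foldl_congr_mem
    intro acc s _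
    apply PySem.List.foldl_congr_mem
    intro acc' x hx
    rw [hval s x hx]
  rw [hcongr, ← List.foldl_flatMap]
  rw [PySem.Dict.items_foldl_insert_fresh _ (fun a => a)
      (fun x => classes.zip (pvGnextIf m x)) PySem.Dict.empty
      (fun x _ => rfl)
      (by simpa using nodup_pvLevels classes.length m 0)]
  unfold pvTail
  have : (PySem.List.pyRange 0 (pvTop classes.length m + 1)).flatMap
      (fun j => (pvComps j classes.length).map (fun x => (x, classes.zip (pvGnextIf m x))))
      = ((PySem.List.pyRange 0 (pvTop classes.length m + 1)).flatMap
          (fun j => pvComps j classes.length)).map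
        (fun x => (x, classes.zip (pvGnextIf m x))) := by
    rw [List.map_flatMap]
  rw [this]
  rfl

-- ===== VERDICT (by name: the statement is the Claim_ definition above) =====
theorem generate_state_transitions_spec : Claim_equal_generate_state_transitions := by
  intro classes m _
  unfold Spec_generate_state_transitions
  rw [pvAltEq]
  unfold generate_state_transitions
  rw [show [List.replicate classes.length (0 : Int)] = pvComps 0 classes.length from
    (pvComps_zero classes.length).symm]
  have htop := pvTop_nonneg classes.length m
  have h := pvOuter classes m (pvTop classes.length m).toNat 0 PySem.Dict.empty
    ((m.toNat + 1) ^ classes.length) (le_refl 0) (by omega)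
    (by simp [PySem.Dict.keys_empty])
    (by simp [PySem.Dict.keys_empty])
    (pvFuel classes.length m)
  simpa using h
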